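-- pv_equiv track=rewrite | github.com/Malak2211/S09-Assignment | task of S.09.py | manage_scoreboard
-- ===== SOURCE A (Python) =====
-- def manage_scoreboard(rounds: list[tuple[int, int]]) -> dict:
--     scoreboard={}
--     for player , score in rounds:
--         if player in scoreboard:
--                  scoreboard[player] += score
--         else:
--             scoreboard[player] = score
--     return scoreboard
-- ===== SOURCE B (Python) =====
-- def manage_scoreboard(rounds: list[tuple[int, int]]) -> dict:
--     # Recursion on the first player: total its scores across all rounds,
--     # then recurse on the rounds of the remaining players.
--     if not rounds:
--         return {}
--     (p, s), rest = rounds[0], rounds[1:]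
--     total = s + sum(t for q, t in rest if q == p)
--     sub = manage_scoreboard([r for r in rest if r[0] != p])
--     return {p: total, **sub}
-- ===== Notes on version B (the rewrite author's own statement) =====
-- stated objective: alternative
-- what changed: Replaces A's single dict-accumulation pass by recursion on the first player: sum all of that player's scores across the list, then recurse on the rounds with that player filtered out (the first-occurrence key order arises from the recursion itself instead of dict insertion order).
import Mathlib
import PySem

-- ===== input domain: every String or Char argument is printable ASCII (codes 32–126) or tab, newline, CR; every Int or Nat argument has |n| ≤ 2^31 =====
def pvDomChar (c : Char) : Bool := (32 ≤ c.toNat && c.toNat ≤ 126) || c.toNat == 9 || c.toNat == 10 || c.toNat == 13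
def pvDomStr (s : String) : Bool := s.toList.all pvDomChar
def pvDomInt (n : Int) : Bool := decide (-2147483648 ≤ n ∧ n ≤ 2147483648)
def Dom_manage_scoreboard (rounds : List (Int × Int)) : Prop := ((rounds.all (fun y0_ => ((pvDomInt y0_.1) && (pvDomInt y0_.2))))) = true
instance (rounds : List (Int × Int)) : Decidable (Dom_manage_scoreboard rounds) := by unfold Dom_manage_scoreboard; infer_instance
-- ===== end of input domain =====

-- B replaces A's single dict-accumulation pass by recursion on the first player
-- (sum that player's scores across the list, recurse on the other players'
-- rounds); a different algorithm of similar size, not claimed faster.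


-- ===== PORT A =====
-- one loop iteration of A: add the score under the player's key (update if present, insert if new)
def msStep (sb : PySem.Dict Int Int) (ps : Int × Int) : PySem.Dict Int Int :=
  if sb.contains ps.1 then sb.modify ps.1 0 (· + ps.2) else sb.insert ps.1 ps.2

def manage_scoreboard (rounds : List (Int × Int)) : List (Int × Int) :=
  (rounds.foldl msStep PySem.Dict.empty).items

-- ===== PORT B =====
-- recursion on the first player; `{p: total, **sub}` is `(p, total) :: sub`
-- since `sub` is built from rounds with player p filtered out.
def manage_scoreboard_alt (rounds : List (Int × Int)) : List (Int × Int) :=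
  match rounds with
  | [] => []
  | (p, s) :: rest =>
    (p, s + ((rest.filter (fun r => r.1 == p)).map (·.2)).sum)
      :: manage_scoreboard_alt (rest.filter (fun r => r.1 != p))
termination_by rounds.length
decreasing_by
  have h := List.length_filter_le (fun x : {x // x ∈ rest} => (x : Int × Int).1 != p) rest.attach
  simp at h ⊢
  omega

-- ===== PRECONDITION & SPEC =====
def Spec_manage_scoreboard (rounds : List (Int × Int)) (out : List (Int × Int)) : Prop := out = manage_scoreboard_alt rounds
instance (rounds : List (Int × Int)) (out : List (Int × Int)) : Decidable (Spec_manage_scoreboard rounds out) := by unfold Spec_manage_scoreboard; infer_instance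

-- ===== CLAIM (what is proved, stated in full; the proofs are below) =====
def Claim_equal_manage_scoreboard : Prop := ∀ (rounds : List (Int × Int)), Dom_manage_scoreboard rounds → Spec_manage_scoreboard rounds (manage_scoreboard rounds)

-- ===== LEMMAS AND PROOFS =====

-- rewriting matched entries is the identity on a list with no matching key
lemma map_keep (p : Int) (w : Int × Int) (t : List (Int × Int)) (h : ∀ r ∈ t, r.1 ≠ p) :
    t.map (fun r => if (r.1 == p) = true then w else r) = t := by
  induction t with
  | nil => rfl
  | cons a t ih =>
    have ha : (a.1 == p) ≠ true := by simp [h a (List.mem_cons_self)]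
    rw [List.map_cons, if_neg ha, ih (fun r hr => h r (List.mem_cons_of_mem _ hr))]

-- head hit: a round for the player at the front of the dict just bumps that value
lemma msStep_head (p v s : Int) (t : List (Int × Int)) (h : ∀ r ∈ t, r.1 ≠ p) :
    msStep (PySem.Dict.mk ((p, v) :: t)) (p, s) = PySem.Dict.mk ((p, v + s) :: t) := by
  simp only [msStep, PySem.Dict.contains, PySem.Dict.modify, PySem.Dict.insert,
    PySem.Dict.getD, PySem.Dict.get?]
  simp only [List.any_cons, beq_self_eq_true, Bool.true_or, if_pos, List.find?_cons,
    List.map_cons, Option.map_some, Option.getD_some]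
  rw [map_keep p _ t h]

-- head miss: a round for a different player acts on the tail of the dict
lemma msStep_miss (p v q s : Int) (t : List (Int × Int)) (hq : q ≠ p) :
    msStep (PySem.Dict.mk ((p, v) :: t)) (q, s)
      = PySem.Dict.mk ((p, v) :: (msStep (PySem.Dict.mk t) (q, s)).items) := by
  have hpq : (p == q) = false := by simp [hq.symm]
  simp only [msStep, PySem.Dict.contains, PySem.Dict.modify, PySem.Dict.insert,
    PySem.Dict.getD, PySem.Dict.get?, List.any_cons, hpq,
    Bool.false_or, List.find?_cons, List.map_cons]
  split <;> simp

-- every step is an insert under the round's key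
lemma msStep_eq_insert (d : PySem.Dict Int Int) (x : Int × Int) :
    ∃ w, msStep d x = d.insert x.1 w := by
  unfold msStep PySem.Dict.modify
  split
  · exact ⟨_, rfl⟩
  · exact ⟨_, rfl⟩

-- every key produced by one step is either the round's player or an existing key
lemma msStep_keys (t : List (Int × Int)) (q s : Int) (p : Int)
    (h : ∀ r ∈ t, r.1 ≠ p) (hq : q ≠ p) :
    ∀ r ∈ (msStep (PySem.Dict.mk t) (q, s)).items, r.1 ≠ p := by
  intro r hr
  obtain ⟨w, hw⟩ := msStep_eq_insert (PySem.Dict.mk t) (q, s)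
  rw [hw] at hr
  simp only [PySem.Dict.insert] at hr
  split at hr
  · rcases List.mem_map.mp hr with ⟨a, ha, hcase⟩
    split at hcase
    · rw [← hcase]; exact hq
    · rw [← hcase]; exact h _ ha
  · rcases List.mem_append.mp hr with hr | hr
    · exact h _ hr
    · rw [List.mem_singleton.mp hr]; exact hq

-- invariant of A's fold: the front entry collects all of player p's scores,
-- the tail processes exactly the other players' rounds
lemma fold_cons (rest : List (Int × Int)) :
    ∀ (t : List (Int × Int)) (v p : Int), (∀ r ∈ t, r.1 ≠ p) →
    (rest.foldl msStep (PySem.Dict.mk ((p, v) :: t))).items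
      = (p, v + ((rest.filter (fun r => r.1 == p)).map (·.2)).sum)
        :: ((rest.filter (fun r => r.1 != p)).foldl msStep (PySem.Dict.mk t)).items := by
  induction rest with
  | nil => intro t v p h; simp
  | cons a rest ih =>
    intro t v p h
    obtain ⟨q, s⟩ := a
    by_cases hq : q = p
    · subst hq
      rw [List.foldl_cons, msStep_head q v s t h, ih t (v + s) q h]
      simp [add_assoc]
    · rw [List.foldl_cons, msStep_miss p v q s t hq]
      rw [ih _ v p (msStep_keys t q s p h hq)]
      have h1 : ((q, s).1 == p) = false := by simp [hq]
      have h2 : ((q, s).1 != p) = true := by simp [hq]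
      simp only [List.filter_cons, h1, h2, if_true, Bool.false_eq_true, if_false,
        List.foldl_cons]

lemma ms_eq_alt_aux : ∀ (n : Nat) (rounds : List (Int × Int)), rounds.length ≤ n →
    manage_scoreboard rounds = manage_scoreboard_alt rounds := by
  intro n
  induction n with
  | zero =>
    intro rounds hlen
    rw [List.length_eq_zero_iff.mp (Nat.le_zero.mp hlen), manage_scoreboard_alt]
    rfl
  | succ n ih =>
    intro rounds hlen
    match rounds with
    | [] => rw [manage_scoreboard_alt]; rfl
    | (p, s) :: rest =>
      show (((p, s) :: rest).foldl msStep PySem.Dict.empty).items = _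
      rw [List.foldl_cons]
      have hstep : msStep PySem.Dict.empty (p, s) = PySem.Dict.mk [(p, s)] := by
        simp [msStep, PySem.Dict.contains, PySem.Dict.empty, PySem.Dict.insert]
      rw [hstep, fold_cons rest [] s p (by simp)]
      have hrec := ih (rest.filter (fun r => r.1 != p))
        (le_trans (List.length_filter_le _ _) (by simpa using Nat.lt_succ_iff.mp (by simpa using hlen)))
      rw [show PySem.Dict.mk ([] : List (Int × Int)) = PySem.Dict.empty from rfl]
      rw [show ((rest.filter (fun r => r.1 != p)).foldl msStep PySem.Dict.empty).items
            = manage_scoreboard (rest.filter (fun r => r.1 != p)) from rfl, hrec]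
      rw [manage_scoreboard_alt]

-- ===== VERDICT (by name: the statement is the Claim_ definition above) =====
theorem manage_scoreboard_spec : Claim_equal_manage_scoreboard := by
  intro rounds _
  show _ = _
  exact ms_eq_alt_aux rounds.length rounds le_rfl
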